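-- pv_equiv track=rewrite | github.com/Amuoeba/elizika | ManualDecode/VowelDistribution/vowelDist.py | VowelDistance
-- ===== SOURCE A (Python) =====
-- def FindNext (test,subList):
--     for i in subList:
--         if test(i):
--             return i
--     return False
--
-- def VowelDistance(txt):
--     """Accepts text as a single string. Retuns a multidimensional dictionary whit distances
--     between two neighbouring vowels and the count of all vowels. ({"a": {"a":[],"e":[],...}, "e":{"a":[],"e":[],...},.....},count) """
--     text = list(enumerate(txt))
--     samoglasniki = ["a","e","i","o","u"]
--     count = 0
--     SpacingDict = {}
--
--
--     for s in samoglasniki: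
--         SpacingDict[s] = {vowel: [] for vowel in samoglasniki}
--
--     for char in text:
--         if char[1] in samoglasniki:
--             count += 1
--             pos1 = char[0]
--             nxt =FindNext(lambda x: x[1] in samoglasniki, text[pos1+1:])
--             if nxt:
--                 pos2 = nxt[0]
--                 distance = pos2 - pos1 -1
--                 SpacingDict[char[1]][nxt[1]].append(distance)
--             else:
--                 return (SpacingDict,count)
--
--     return (SpacingDict,count)
-- ===== SOURCE B (Python) =====
-- def VowelDistance(txt):
--     """Single pass: track the previous vowel's position and letter, append each
--     consecutive-pair distance directly. Same result as the quadratic rescan."""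
--     samoglasniki = ["a", "e", "i", "o", "u"]
--     SpacingDict = {s: {v: [] for v in samoglasniki} for s in samoglasniki}
--     count = 0
--     prev = None  # (position, vowel) of the previous vowel seen
--     for i, ch in enumerate(txt):
--         if ch in samoglasniki:
--             count += 1
--             if prev is not None:
--                 SpacingDict[prev[1]][ch].append(i - prev[0] - 1)
--             prev = (i, ch)
--     return (SpacingDict, count)
-- ===== Notes on version B (the rewrite author's own statement) =====
-- stated objective: faster
-- what changed: Replaced the per-vowel rescan of the rest of the text (FindNext over a slice for every vowel) by a single left-to-right pass that remembers the previous vowel's position and letter and appends each consecutive-pair distance directly.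
import Mathlib
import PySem

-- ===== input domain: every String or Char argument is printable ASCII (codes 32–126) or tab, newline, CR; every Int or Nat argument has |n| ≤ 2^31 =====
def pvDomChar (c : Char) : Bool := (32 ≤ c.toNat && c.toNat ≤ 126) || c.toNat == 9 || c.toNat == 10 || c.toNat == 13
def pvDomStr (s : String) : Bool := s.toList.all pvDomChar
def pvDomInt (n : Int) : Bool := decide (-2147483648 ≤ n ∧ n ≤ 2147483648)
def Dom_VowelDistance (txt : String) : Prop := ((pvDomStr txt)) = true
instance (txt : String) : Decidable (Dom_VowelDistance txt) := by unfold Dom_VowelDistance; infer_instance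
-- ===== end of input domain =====

-- B replaces A's quadratic rescan for the next vowel by a single pass that remembers the
-- previous vowel; one O(n) traversal instead of O(n^2). Return values are identical.

-- ===== PORT A =====
-- shared dict representation helpers (Python dict -> assoc list, per the type convention):
def pvSamoglasniki : List String := ["a", "e", "i", "o", "u"]

def pvInitDict : List (String × List (String × List Int)) :=
  pvSamoglasniki.map (fun s => (s, pvSamoglasniki.map (fun v => (v, []))))

-- SpacingDict[k1][k2].append(x) on the assoc-list representation
def pvAppendD (d : List (String × List (String × List Int))) (k1 k2 : String) (x : Int) :
    List (String × List (String × List Int)) :=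
  d.map (fun p => if p.1 = k1 then
      (p.1, p.2.map (fun q => if q.1 = k2 then (q.1, q.2 ++ [x]) else q))
    else p)

-- char[1] in samoglasniki (shared membership test)
def pvIsV (c : Char) : Bool := pvSamoglasniki.contains (String.singleton c)

def FindNext (test : Int × Char → Bool) : List (Int × Char) → Option (Int × Char)
  | [] => none
  | i :: rest => if test i then some i else FindNext test rest

-- A's 'for char in text' loop; text[pos1+1:] is a slice of the FULL enumerate list
def pvLoopA (text : List (Int × Char)) :
    List (Int × Char) → List (String × List (String × List Int)) → Int →
    (List (String × List (String × List Int))) × Int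
  | [], d, cnt => (d, cnt)
  | (i, c) :: rest, d, cnt =>
    if pvIsV c then
      match FindNext (fun x => pvIsV x.2)
          (PySem.List.slice text (some (i + 1)) none) with
      | some (j, e) =>
          pvLoopA text rest
            (pvAppendD d (String.singleton c) (String.singleton e) (j - i - 1)) (cnt + 1)
      | none => (d, cnt + 1)        -- early return
    else pvLoopA text rest d cnt

def VowelDistance (txt : String) : (List (String × List (String × List Int))) × Int :=
  pvLoopA (PySem.List.enumerate txt.toList 0) (PySem.List.enumerate txt.toList 0) pvInitDict 0

-- ===== PORT B =====
-- B's single pass: prev = position and letter of the previous vowel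
def pvLoopB : List (Int × Char) → List (String × List (String × List Int)) → Int →
    Option (Int × Char) → (List (String × List (String × List Int))) × Int
  | [], d, cnt, _ => (d, cnt)
  | (i, c) :: rest, d, cnt, prev =>
    if pvIsV c then
      pvLoopB rest
        (match prev with
         | some (j, e) => pvAppendD d (String.singleton e) (String.singleton c) (i - j - 1)
         | none => d)
        (cnt + 1) (some (i, c))
    else pvLoopB rest d cnt prev

def VowelDistance_alt (txt : String) : (List (String × List (String × List Int))) × Int :=
  pvLoopB (PySem.List.enumerate txt.toList 0) pvInitDict 0 none

-- ===== PRECONDITION & SPEC =====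
def Spec_VowelDistance (txt : String) (out : (List (String × List (String × List Int))) × Int) : Prop := out = VowelDistance_alt txt
instance (txt : String) (out : (List (String × List (String × List Int))) × Int) : Decidable (Spec_VowelDistance txt out) := by unfold Spec_VowelDistance; infer_instance

-- ===== CLAIM (what is proved, stated in full; the proofs are below) =====
def Claim_equal_VowelDistance : Prop := ∀ (txt : String), Dom_VowelDistance txt → Spec_VowelDistance txt (VowelDistance txt)

-- ===== LEMMAS AND PROOFS =====

-- the vowels (with their positions) of a piece of the enumerated text
def pvVF (l : List (Int × Char)) : List (Int × Char) :=
  l.filter (fun x => pvIsV x.2)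

-- common characterisation: fold the consecutive-pair distances of a vowel list into the dict
def pvFold (d : List (String × List (String × List Int))) :
    List (Int × Char) → List (String × List (String × List Int))
  | (i, c) :: (j, e) :: rest =>
      pvFold (pvAppendD d (String.singleton c) (String.singleton e) (j - i - 1)) ((j, e) :: rest)
  | _ => d

lemma findNext_eq_head_vf (l : List (Int × Char)) :
    FindNext (fun x => pvIsV x.2) l = (pvVF l).head? := by
  induction l with
  | nil => rfl
  | cons x xs ih =>
    by_cases h : pvIsV x.2 <;> simp [FindNext, pvVF, h, ih]

lemma loopB_eq (l : List (Int × Char)) : ∀ (d : List (String × List (String × List Int)))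
    (cnt : Int) (prev : Option (Int × Char)),
    pvLoopB l d cnt prev = (pvFold d (prev.toList ++ pvVF l), cnt + (pvVF l).length) := by
  induction l with
  | nil =>
    intro d cnt prev
    cases prev <;> simp [pvLoopB, pvVF, pvFold]
  | cons x xs ih =>
    intro d cnt prev
    obtain ⟨i, c⟩ := x
    by_cases h : pvIsV c
    · rw [show pvLoopB ((i, c) :: xs) d cnt prev =
          pvLoopB xs (match prev with
            | some (j, e) => pvAppendD d (String.singleton e) (String.singleton c) (i - j - 1)
            | none => d) (cnt + 1) (some (i, c)) from by simp [pvLoopB, h]]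
      rw [ih]
      have hvf : pvVF ((i, c) :: xs) = (i, c) :: pvVF xs := by simp [pvVF, h]
      cases prev with
      | none => simp [hvf]; ring
      | some q =>
        obtain ⟨j, e⟩ := q
        simp only [hvf, Option.toList, List.cons_append, List.nil_append, pvFold,
          List.length_cons]
        simp only [Prod.mk.injEq, true_and]
        push_cast; ring
    · rw [show pvLoopB ((i, c) :: xs) d cnt prev = pvLoopB xs d cnt prev from by
        simp [pvLoopB, h]]
      rw [ih]
      simp [pvVF, h]

lemma loopA_eq (cs : List Char) : ∀ (k n : Nat) (d : List (String × List (String × List Int)))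
    (cnt : Int), cs.length - n ≤ k →
    pvLoopA (PySem.List.enumerate cs 0) ((PySem.List.enumerate cs 0).drop n) d cnt =
      (pvFold d (pvVF ((PySem.List.enumerate cs 0).drop n)),
       cnt + (pvVF ((PySem.List.enumerate cs 0).drop n)).length) := by
  intro k
  induction k with
  | zero =>
    intro n d cnt hk
    have hlen : (PySem.List.enumerate cs 0).length ≤ n := by
      rw [PySem.List.length_enumerate]; omega
    rw [List.drop_of_length_le hlen]
    simp [pvLoopA, pvVF, pvFold]
  | succ k ih =>
    intro n d cnt hk
    by_cases hn : cs.length ≤ n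
    · have hlen : (PySem.List.enumerate cs 0).length ≤ n := by
        rw [PySem.List.length_enumerate]; omega
      rw [List.drop_of_length_le hlen]
      simp [pvLoopA, pvVF, pvFold]
    · rw [not_le] at hn
      have hn' : n < (PySem.List.enumerate cs 0).length := by
        rw [PySem.List.length_enumerate]; omega
      have hdrop : (PySem.List.enumerate cs 0).drop n =
          ((0 : Int) + n, cs[n]) :: (PySem.List.enumerate cs 0).drop (n + 1) := by
        rw [List.drop_eq_getElem_cons hn', PySem.List.getElem_enumerate]
      have hslice : PySem.List.slice (PySem.List.enumerate cs 0) (some ((0 : Int) + n + 1)) none =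
          (PySem.List.enumerate cs 0).drop (n + 1) := by
        rw [PySem.List.slice_from]
        · congr 1
          omega
        · omega
      rw [hdrop]
      by_cases h : pvIsV cs[n]
      · have hvf : pvVF (((0 : Int) + n, cs[n]) :: (PySem.List.enumerate cs 0).drop (n + 1)) =
            ((0 : Int) + n, cs[n]) :: pvVF ((PySem.List.enumerate cs 0).drop (n + 1)) := by
          simp [pvVF, h]
        rw [hvf]
        rw [show pvLoopA (PySem.List.enumerate cs 0)
            ((((0 : Int) + n, cs[n])) :: (PySem.List.enumerate cs 0).drop (n + 1)) d cnt =
            (match FindNext (fun x => pvIsV x.2)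
                (PySem.List.slice (PySem.List.enumerate cs 0) (some ((0 : Int) + n + 1)) none) with
             | some (j, e) =>
                pvLoopA (PySem.List.enumerate cs 0) ((PySem.List.enumerate cs 0).drop (n + 1))
                  (pvAppendD d (String.singleton cs[n]) (String.singleton e) (j - ((0 : Int) + n) - 1))
                  (cnt + 1)
             | none => (d, cnt + 1)) from by simp [pvLoopA, h]]
        rw [hslice, findNext_eq_head_vf]
        rcases hv2 : pvVF ((PySem.List.enumerate cs 0).drop (n + 1)) with _ | ⟨⟨j, e⟩, tl⟩
        · simp [pvFold]
        · simp only [List.head?_cons]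
          rw [ih (n + 1) _ _ (by omega), hv2]
          simp only [pvFold, List.length_cons]
          simp only [Prod.mk.injEq, true_and]
          push_cast; ring
      · have hvf : pvVF (((0 : Int) + n, cs[n]) :: (PySem.List.enumerate cs 0).drop (n + 1)) =
            pvVF ((PySem.List.enumerate cs 0).drop (n + 1)) := by
          simp [pvVF, h]
        rw [show pvLoopA (PySem.List.enumerate cs 0)
            ((((0 : Int) + n, cs[n])) :: (PySem.List.enumerate cs 0).drop (n + 1)) d cnt =
            pvLoopA (PySem.List.enumerate cs 0) ((PySem.List.enumerate cs 0).drop (n + 1)) d cnt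
            from by simp [pvLoopA, h]]
        rw [ih (n + 1) _ _ (by omega), hvf]

-- ===== VERDICT (by name: the statement is the Claim_ definition above) =====
theorem VowelDistance_spec : Claim_equal_VowelDistance := by
  intro txt _
  unfold Spec_VowelDistance VowelDistance VowelDistance_alt
  rw [loopB_eq]
  have := loopA_eq txt.toList txt.toList.length 0 pvInitDict 0 (by omega)
  simp only [List.drop_zero] at this
  rw [this]
  simp
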